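-- pv_equiv track=rewrite | github.com/prathamshrestha/assignment-II | 10.py | change_case
-- ===== SOURCE A (Python) =====
-- def change_case(str,choice):
--     res1 = [str[0].lower()]
--     res2 = [str[0].lower()]
--
--     for c in str[1:]:
--         if c in ('ABCDEFGHIJKLMNOPQRSTUVWXYZ'):
--             res1.append('_')
--             res1.append(c.lower())
--             res2.append('-')
--             res2.append(c.lower())
--         else:
--             res1.append(c)
--             res2.append(c)
--     if choice=='1':
--         return ''.join(res1)
--     else:
--         return ''.join(res2)
-- ===== SOURCE B (Python) =====
-- import re
--
--
-- def change_case(str, choice):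
--     sep = '_' if choice == '1' else '-'
--     return str[0].lower() + re.sub('[A-Z]', lambda m: sep + m.group(0).lower(), str[1:])
-- ===== Notes on version B (the rewrite author's own statement) =====
-- stated objective: idiomatic
-- what changed: B picks the separator once from choice and rewrites the tail with a single regex substitution ([A-Z] -> sep + lowercase), instead of A's per-character loop that builds two parallel result lists and joins one of them at the end.
import Mathlib
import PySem

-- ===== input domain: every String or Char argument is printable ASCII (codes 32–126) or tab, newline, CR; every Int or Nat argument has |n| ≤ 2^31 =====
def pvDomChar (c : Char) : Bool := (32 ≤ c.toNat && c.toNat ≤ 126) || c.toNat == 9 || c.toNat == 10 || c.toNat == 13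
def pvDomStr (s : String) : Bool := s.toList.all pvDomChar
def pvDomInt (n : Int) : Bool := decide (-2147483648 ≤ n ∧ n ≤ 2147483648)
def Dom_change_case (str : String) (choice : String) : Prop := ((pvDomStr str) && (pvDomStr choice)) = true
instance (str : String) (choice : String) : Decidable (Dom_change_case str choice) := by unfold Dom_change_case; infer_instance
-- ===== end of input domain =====

-- B: pick the separator once and rewrite the tail by a single per-uppercase substitution
-- ([A-Z] -> sep + lowercase), instead of A's loop building two parallel result lists (idiomatic).


-- ===== PORT A =====
-- the literal 'ABCDEFGHIJKLMNOPQRSTUVWXYZ'; for a single char, Python's `c in s` is list membership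
def pvUpperAlpha : List Char :=
  ['A','B','C','D','E','F','G','H','I','J','K','L','M',
   'N','O','P','Q','R','S','T','U','V','W','X','Y','Z']

-- A: str[0] raises IndexError on "" (excluded by Pre_); the loop appends to res1 and res2.
def change_case (str : String) (choice : String) : String :=
  match str.toList with
  | [] => ""   -- Python raises IndexError here; outside Pre_change_case
  | c0 :: rest =>
    let res : List Char × List Char :=
      rest.foldl (fun acc c =>
        if c ∈ pvUpperAlpha then
          (acc.1 ++ ['_', PySem.Chars.lowerChar c], acc.2 ++ ['-', PySem.Chars.lowerChar c])
        else
          (acc.1 ++ [c], acc.2 ++ [c]))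
        ([PySem.Chars.lowerChar c0], [PySem.Chars.lowerChar c0])
    if choice = "1" then String.ofList res.1 else String.ofList res.2

-- ===== PORT B =====
-- B: re.sub('[A-Z]', lambda m: sep + m.group(0).lower(), tail); the regex class [A-Z]
-- is exactly the ASCII code range 65..90, ported as that range test on c.toNat.
def change_case_alt (str : String) (choice : String) : String :=
  match str.toList with
  | [] => ""   -- Python raises IndexError here; outside Pre_change_case
  | c0 :: rest =>
    let sep : Char := if choice = "1" then '_' else '-'
    String.ofList (PySem.Chars.lowerChar c0 ::
      rest.flatMap (fun c =>
        if 65 ≤ c.toNat ∧ c.toNat ≤ 90 then [sep, PySem.Chars.lowerChar c] else [c]))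

-- ===== PRECONDITION & SPEC =====
-- Pre_ excludes only the empty string, on which A raises IndexError (str[0]).
def Pre_change_case (str : String) (choice : String) : Prop := str ≠ ""
instance (str : String) (choice : String) : Decidable (Pre_change_case str choice) := by unfold Pre_change_case; infer_instance
def pvWitness_change_case : String × String := ("helloWorld", "1")

def Spec_change_case (str : String) (choice : String) (out : String) : Prop := out = change_case_alt str choice
instance (str : String) (choice : String) (out : String) : Decidable (Spec_change_case str choice out) := by unfold Spec_change_case; infer_instance

-- ===== CLAIM (what is proved, stated in full; the proofs are below) =====
def Claim_equal_change_case : Prop := ∀ (str : String) (choice : String), Dom_change_case str choice → Pre_change_case str choice → Spec_change_case str choice (change_case str choice)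

-- ===== LEMMAS AND PROOFS =====

lemma mem_pvUpperAlpha_iff (c : Char) : c ∈ pvUpperAlpha ↔ (65 ≤ c.toNat ∧ c.toNat ≤ 90) := by
  constructor
  · intro h; fin_cases h <;> decide
  · rintro ⟨h1, h2⟩
    have hofnat : Char.ofNat c.toNat = c := Char.ofNat_toNat c
    rw [← hofnat]
    interval_cases h : c.toNat <;> decide

lemma fold_pair_eq (l : List Char) (a1 a2 : List Char) :
    l.foldl (fun acc c =>
        if c ∈ pvUpperAlpha then
          (acc.1 ++ ['_', PySem.Chars.lowerChar c], acc.2 ++ ['-', PySem.Chars.lowerChar c])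
        else
          (acc.1 ++ [c], acc.2 ++ [c])) (a1, a2)
    = (a1 ++ l.flatMap (fun c => if 65 ≤ c.toNat ∧ c.toNat ≤ 90 then ['_', PySem.Chars.lowerChar c] else [c]),
       a2 ++ l.flatMap (fun c => if 65 ≤ c.toNat ∧ c.toNat ≤ 90 then ['-', PySem.Chars.lowerChar c] else [c])) := by
  induction l generalizing a1 a2 with
  | nil => simp
  | cons c cs ih =>
    by_cases h : 65 ≤ c.toNat ∧ c.toNat ≤ 90
    · have hm : c ∈ pvUpperAlpha := (mem_pvUpperAlpha_iff c).mpr h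
      simp [List.foldl_cons, hm, h, ih]
    · have hm : c ∉ pvUpperAlpha := fun hc => h ((mem_pvUpperAlpha_iff c).mp hc)
      simp [List.foldl_cons, hm, h, ih]

-- ===== VERDICT (by name: the statement is the Claim_ definition above) =====
theorem change_case_spec : Claim_equal_change_case := by
  intro str choice _ hpre
  unfold Spec_change_case change_case change_case_alt
  cases hs : str.toList with
  | nil => exact absurd (by rwa [String.toList_eq_nil_iff] at hs) hpre
  | cons c0 rest =>
    simp only [fold_pair_eq]
    by_cases hch : choice = "1" <;> simp [hch]
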